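-- pv_equiv track=rewrite | github.com/licette32/computational-thinking | problem1.py | encontrar_camino
-- ===== SOURCE A (Python) =====
-- def encontrar_camino(laberinto, punto_inicio, punto_final):
--     visitados = set()
--     camino = []
--
--     def dfs(nodo):
--         if nodo in visitados:
--             return False
--         visitados.add(nodo)
--         camino.append(nodo)
--
--         if nodo == punto_final:
--             return True
--
--         for vecino in laberinto.get(nodo, []):
--             if dfs(vecino):
--                 return True
--
--         camino.pop()
--         return False
--
--     if dfs(punto_inicio):
--         return camino
--     return None
-- ===== SOURCE B (Python) =====
-- def encontrar_camino(laberinto, punto_inicio, punto_final):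
--     # Iterative DFS with an explicit stack of pending-neighbor frames instead of
--     # recursion; camino is the stack of entered nodes, popped on backtrack.
--     visitados = {punto_inicio}
--     camino = [punto_inicio]
--     if punto_inicio == punto_final:
--         return camino
--     stack = [list(laberinto.get(punto_inicio, []))]
--     while stack:
--         vecinos = stack[-1]
--         avanzado = False
--         while vecinos:
--             v = vecinos.pop(0)
--             if v not in visitados:
--                 visitados.add(v)
--                 camino.append(v)
--                 if v == punto_final:
--                     return camino
--                 stack.append(list(laberinto.get(v, [])))
--                 avanzado = True
--                 break
--         if not avanzado:
--             stack.pop()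
--             camino.pop()
--     return None
-- ===== Notes on version B (the rewrite author's own statement) =====
-- stated objective: alternative
-- what changed: A's recursive boolean DFS (inner dfs closure mutating shared visitados/camino) is replaced by an iterative DFS driving an explicit stack of pending-neighbor frames with a while loop, entering nodes in the same left-to-right order and popping camino when a frame is exhausted.
import Mathlib
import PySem

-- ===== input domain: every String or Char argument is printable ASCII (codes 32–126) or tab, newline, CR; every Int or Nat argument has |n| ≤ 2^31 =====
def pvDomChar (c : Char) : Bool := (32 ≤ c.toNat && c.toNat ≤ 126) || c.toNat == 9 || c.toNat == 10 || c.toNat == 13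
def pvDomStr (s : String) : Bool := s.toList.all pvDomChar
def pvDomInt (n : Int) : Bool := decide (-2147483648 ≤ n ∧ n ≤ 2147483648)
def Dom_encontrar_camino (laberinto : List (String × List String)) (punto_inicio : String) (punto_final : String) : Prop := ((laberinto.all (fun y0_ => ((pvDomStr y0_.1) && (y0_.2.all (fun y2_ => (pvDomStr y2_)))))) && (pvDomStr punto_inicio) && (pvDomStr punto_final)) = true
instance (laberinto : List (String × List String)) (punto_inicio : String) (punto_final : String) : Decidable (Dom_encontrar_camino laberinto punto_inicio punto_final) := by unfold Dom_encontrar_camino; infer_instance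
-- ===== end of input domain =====

-- B replaces A's recursive boolean DFS (shared visitados/camino mutated by an inner closure)
-- by an iterative DFS over an explicit stack of pending-neighbor frames (objective: alternative).
-- Both ports carry a fuel parameter only to make the loops structural; the chosen fuels
-- provably exceed the number of recursion levels / loop iterations possible.

-- ===== PORT A =====
-- laberinto.get(nodo, []): first-match lookup in the association list (used by both ports).
def pyGetAdj (laberinto : List (String × List String)) (nodo : String) : List String :=
  ((laberinto.find? (fun p => p.1 == nodo)).map Prod.snd).getD []

-- dfsA fuel nodo vis cam transliterates A's inner `dfs`; state = (visitados, camino);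
-- `none` = out of fuel (never reached at the fuel encontrar_camino supplies).
mutual
def dfsA (laberinto : List (String × List String)) (punto_final : String) :
    Nat → String → PySem.Set String → List String →
      Option (Bool × PySem.Set String × List String)
  | 0, _, _, _ => none
  | fuel + 1, nodo, vis, cam =>
    if PySem.Set.contains vis nodo then some (false, vis, cam)
    else
      let vis := PySem.Set.add vis nodo
      let cam := cam ++ [nodo]
      if nodo = punto_final then some (true, vis, cam)
      else
        match forA laberinto punto_final fuel (pyGetAdj laberinto nodo) vis cam with
        | none => none
        | some (true, vis', cam') => some (true, vis', cam')
        | some (false, vis', cam') => some (false, vis', cam'.dropLast)   -- camino.pop()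
  termination_by fuel _ _ _ => (fuel, 0)

def forA (laberinto : List (String × List String)) (punto_final : String) :
    Nat → List String → PySem.Set String → List String →
      Option (Bool × PySem.Set String × List String)
  | _, [], vis, cam => some (false, vis, cam)
  | fuel, v :: rest, vis, cam =>
    match dfsA laberinto punto_final fuel v vis cam with
    | none => none
    | some (true, vis', cam') => some (true, vis', cam')
    | some (false, vis', cam') => forA laberinto punto_final fuel rest vis' cam'
  termination_by fuel l _ _ => (fuel, l.length + 1)
end

def encontrar_camino (laberinto : List (String × List String)) (punto_inicio : String) (punto_final : String) : Option (List String) :=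
  match dfsA laberinto punto_final (3 + (laberinto.map (fun p => p.2.length)).sum)
      punto_inicio PySem.Set.empty [] with
  | some (true, _, cam) => some cam
  | _ => none

-- ===== PORT B =====
-- B's inner `while vecinos: v = vecinos.pop(0); if v not in visitados: … break`:
-- first unvisited neighbor of the top frame together with the remaining ones.
def nextUnvis (vis : PySem.Set String) : List String → Option (String × List String)
  | [] => none
  | v :: rest => if PySem.Set.contains vis v then nextUnvis vis rest else some (v, rest)

-- B's outer `while stack:` loop; state = (stack of frames, visitados, camino);
-- `none` = out of fuel (never reached at the fuel encontrar_camino_alt supplies),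
-- `some r` = the loop finished with result r.
def loopB (laberinto : List (String × List String)) (punto_final : String) :
    Nat → List (List String) → PySem.Set String → List String →
      Option (Option (List String))
  | 0, _, _, _ => none
  | _ + 1, [], _, _ => some none                                    -- while exits: return None
  | fuel + 1, vecinos :: rest, vis, cam =>
    match nextUnvis vis vecinos with
    | none => loopB laberinto punto_final fuel rest vis cam.dropLast  -- stack.pop(); camino.pop()
    | some (v, vecinos') =>
      let vis := PySem.Set.add vis v
      let cam := cam ++ [v]
      if v = punto_final then some (some cam)
      else loopB laberinto punto_final fuel
             (pyGetAdj laberinto v :: vecinos' :: rest) vis cam      -- push new frame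

def encontrar_camino_alt (laberinto : List (String × List String)) (punto_inicio : String) (punto_final : String) : Option (List String) :=
  let vis := PySem.Set.add PySem.Set.empty punto_inicio
  let cam := [punto_inicio]
  if punto_inicio = punto_final then some cam
  else
    match loopB laberinto punto_final (2 * (laberinto.map (fun p => p.2.length)).sum + 4)
        [pyGetAdj laberinto punto_inicio] vis cam with
    | some r => r
    | none => none

-- ===== PRECONDITION & SPEC =====
def Spec_encontrar_camino (laberinto : List (String × List String)) (punto_inicio : String) (punto_final : String) (out : Option (List String)) : Prop := out = encontrar_camino_alt laberinto punto_inicio punto_final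
instance (laberinto : List (String × List String)) (punto_inicio : String) (punto_final : String) (out : Option (List String)) : Decidable (Spec_encontrar_camino laberinto punto_inicio punto_final out) := by unfold Spec_encontrar_camino; infer_instance

-- ===== CLAIM (what is proved, stated in full; the proofs are below) =====
def Claim_equal_encontrar_camino : Prop := ∀ (laberinto : List (String × List String)) (punto_inicio : String) (punto_final : String), Dom_encontrar_camino laberinto punto_inicio punto_final → Spec_encontrar_camino laberinto punto_inicio punto_final (encontrar_camino laberinto punto_inicio punto_final)



-- ===== LEMMAS AND PROOFS =====

-- All neighbor strings of the maze: every node the DFS can enter below the start.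
def allN (laberinto : List (String × List String)) : List String :=
  (laberinto.map Prod.snd).flatten

-- Number of still-unvisited candidate nodes; the potential function of both searches.
def pvFree (laberinto : List (String × List String)) (vis : PySem.Set String) : Nat :=
  ((allN laberinto).filter (fun x => !(PySem.Set.contains vis x))).length

theorem pyGetAdj_sub (laberinto : List (String × List String)) (v x : String)
    (hx : x ∈ pyGetAdj laberinto v) : x ∈ allN laberinto := by
  unfold pyGetAdj at hx
  unfold allN
  cases hf : laberinto.find? (fun p => p.1 == v) with
  | none => rw [hf] at hx; simp at hx
  | some p =>
    rw [hf] at hx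
    simp only [Option.map_some, Option.getD_some] at hx
    exact List.mem_flatten.2 ⟨p.2, List.mem_map.2 ⟨p, List.mem_of_find?_eq_some hf, rfl⟩, hx⟩

theorem filter_length_le (l : List String) (p q : String → Bool)
    (himp : ∀ x, q x = true → p x = true) :
    (l.filter q).length ≤ (l.filter p).length := by
  calc (l.filter q).length = ((l.filter p).filter q).length := by
        rw [List.filter_filter]
        congr 1
        apply List.filter_congr
        intro x _
        cases hq : q x
        · simp
        · simp [himp x hq]
    _ ≤ (l.filter p).length := List.length_filter_le _ _

theorem filter_length_lt (L : List String) (p q : String → Bool) (v : String) (hv : v ∈ L)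
    (hpv : p v = true) (hqv : q v = false) (himp : ∀ x, q x = true → p x = true) :
    (L.filter q).length < (L.filter p).length := by
  induction L with
  | nil => simp at hv
  | cons a l ih =>
    rcases List.mem_cons.1 hv with h | h
    · subst h
      simp only [List.filter_cons, hpv, hqv, if_pos]
      have hle : (l.filter q).length ≤ (l.filter p).length := filter_length_le l p q himp
      simp [Nat.lt_succ_of_le hle]
    · simp only [List.filter_cons]
      cases hq : q a
      · cases hp : p a <;> simp [ih h, Nat.lt_succ_of_lt (ih h)]
      · simp [himp a hq, Nat.succ_lt_succ (ih h)]

theorem pvFree_add_lt (laberinto : List (String × List String)) (vis : PySem.Set String)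
    (v : String) (hv : v ∈ allN laberinto) (hnv : PySem.Set.contains vis v = false) :
    pvFree laberinto (PySem.Set.add vis v) < pvFree laberinto vis := by
  unfold pvFree
  apply filter_length_lt (allN laberinto) _ _ v hv
  · show (!PySem.Set.contains vis v) = true
    rw [hnv]; rfl
  · show (!PySem.Set.contains (PySem.Set.add vis v) v) = false
    rw [(PySem.Set.contains_iff _ _).2 ((PySem.Set.mem_add _ _ _).2 (Or.inr rfl))]; rfl
  · intro x hx
    have hx' : (!PySem.Set.contains (PySem.Set.add vis v) x) = true := hx
    show (!PySem.Set.contains vis x) = true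
    cases hc : PySem.Set.contains vis x with
    | false => rfl
    | true =>
      rw [(PySem.Set.contains_iff _ _).2 ((PySem.Set.mem_add _ _ _).2
        (Or.inl ((PySem.Set.contains_iff _ _).1 hc)))] at hx'
      cases hx' 

-- ----- small-step equations of B's machine -----

theorem nextUnvis_cons_mem (vis : PySem.Set String) (v : String) (l : List String)
    (hv : PySem.Set.contains vis v = true) :
    nextUnvis vis (v :: l) = nextUnvis vis l := by
  rw [nextUnvis, hv]; rfl

theorem nextUnvis_cons_new (vis : PySem.Set String) (v : String) (l : List String)
    (hv : PySem.Set.contains vis v = false) :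
    nextUnvis vis (v :: l) = some (v, l) := by
  rw [nextUnvis, hv]; rfl

theorem loopB_pop (laberinto : List (String × List String)) (punto_final : String)
    (fuel : Nat) (vecinos : List String) (rest : List (List String))
    (vis : PySem.Set String) (cam : List String)
    (hnu : nextUnvis vis vecinos = none) :
    loopB laberinto punto_final (fuel + 1) (vecinos :: rest) vis cam =
      loopB laberinto punto_final fuel rest vis cam.dropLast := by
  rw [loopB, hnu]

theorem loopB_found (laberinto : List (String × List String)) (punto_final : String)
    (fuel : Nat) (vecinos : List String) (rest : List (List String))
    (vis : PySem.Set String) (cam : List String) (v : String) (ve : List String)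
    (hnu : nextUnvis vis vecinos = some (v, ve)) (hf : v = punto_final) :
    loopB laberinto punto_final (fuel + 1) (vecinos :: rest) vis cam =
      some (some (cam ++ [v])) := by
  rw [loopB, hnu]
  exact if_pos hf

theorem loopB_push (laberinto : List (String × List String)) (punto_final : String)
    (fuel : Nat) (vecinos : List String) (rest : List (List String))
    (vis : PySem.Set String) (cam : List String) (v : String) (ve : List String)
    (hnu : nextUnvis vis vecinos = some (v, ve)) (hf : v ≠ punto_final) :
    loopB laberinto punto_final (fuel + 1) (vecinos :: rest) vis cam =
      loopB laberinto punto_final fuel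
        (pyGetAdj laberinto v :: ve :: rest) (PySem.Set.add vis v) (cam ++ [v]) := by
  rw [loopB, hnu]
  exact if_neg hf

theorem loopB_mono_succ (laberinto : List (String × List String)) (punto_final : String) :
    ∀ (k : Nat) (stack : List (List String)) (vis : PySem.Set String) (cam : List String)
      (r : Option (List String)),
      loopB laberinto punto_final k stack vis cam = some r →
      loopB laberinto punto_final (k + 1) stack vis cam = some r := by
  intro k
  induction k with
  | zero => intro stack vis cam r h; simp [loopB] at h
  | succ k ih =>
    intro stack vis cam r h
    match stack with
    | [] => simpa [loopB] using h
    | vecinos :: rest =>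
      cases hnu : nextUnvis vis vecinos with
      | none =>
        rw [loopB_pop _ _ _ _ _ _ _ hnu] at h ⊢
        exact ih _ _ _ _ h
      | some p =>
        obtain ⟨v, ve⟩ := p
        by_cases hf : v = punto_final
        · rw [loopB_found _ _ _ _ _ _ _ _ _ hnu hf] at h ⊢
          exact h
        · rw [loopB_push _ _ _ _ _ _ _ _ _ hnu hf] at h ⊢
          exact ih _ _ _ _ h

theorem loopB_mono (laberinto : List (String × List String)) (punto_final : String)
    (k m : Nat) (stack : List (List String)) (vis : PySem.Set String) (cam : List String)
    (r : Option (List String))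
    (h : loopB laberinto punto_final k stack vis cam = some r) :
    loopB laberinto punto_final (k + m) stack vis cam = some r := by
  induction m with
  | zero => exact h
  | succ m ih => exact loopB_mono_succ laberinto punto_final _ _ _ _ _ ih

-- A frame headed by an already-visited neighbor behaves as if that neighbor were gone.
theorem loopB_skip (laberinto : List (String × List String)) (punto_final : String)
    (v : String) (l : List String) (rest : List (List String)) (vis : PySem.Set String)
    (cam : List String) (hv : PySem.Set.contains vis v = true) (fuel : Nat) :
    loopB laberinto punto_final fuel ((v :: l) :: rest) vis cam =
      loopB laberinto punto_final fuel (l :: rest) vis cam := by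
  cases fuel with
  | zero => rfl
  | succ fuel => rw [loopB, loopB, nextUnvis_cons_mem vis v l hv]

-- ----- equations of A's neighbor loop with the `dfs` body inlined -----

theorem forA_nil (laberinto : List (String × List String)) (punto_final : String)
    (fuel : Nat) (vis : PySem.Set String) (cam : List String) :
    forA laberinto punto_final fuel [] vis cam = some (false, vis, cam) := by
  rw [forA]

theorem forA_cons_mem (laberinto : List (String × List String)) (punto_final : String)
    (fuel : Nat) (v : String) (l : List String) (vis : PySem.Set String) (cam : List String)
    (hv : PySem.Set.contains vis v = true) :
    forA laberinto punto_final (fuel + 1) (v :: l) vis cam =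
      forA laberinto punto_final (fuel + 1) l vis cam := by
  have hm : v ∈ vis := (PySem.Set.contains_iff _ _).1 hv
  rw [forA, dfsA]
  simp [hm]

theorem forA_cons_final (laberinto : List (String × List String)) (punto_final : String)
    (fuel : Nat) (v : String) (l : List String) (vis : PySem.Set String) (cam : List String)
    (hv : PySem.Set.contains vis v = false) (hf : v = punto_final) :
    forA laberinto punto_final (fuel + 1) (v :: l) vis cam =
      some (true, PySem.Set.add vis v, cam ++ [v]) := by
  have hm : v ∉ vis := fun hmm => by
    rw [(PySem.Set.contains_iff _ _).2 hmm] at hv; cases hv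
  subst hf
  rw [forA, dfsA]
  simp [hm]

theorem forA_step (laberinto : List (String × List String)) (punto_final : String)
    (fuel : Nat) (v : String) (l : List String) (vis : PySem.Set String) (cam : List String)
    (hv : PySem.Set.contains vis v = false) (hf : v ≠ punto_final) :
    forA laberinto punto_final (fuel + 1) (v :: l) vis cam =
      match forA laberinto punto_final fuel (pyGetAdj laberinto v)
          (PySem.Set.add vis v) (cam ++ [v]) with
      | none => none
      | some (true, a, c) => some (true, a, c)
      | some (false, a, c) => forA laberinto punto_final (fuel + 1) l a c.dropLast := by
  rw [forA, dfsA]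
  simp only [hv, Bool.false_eq_true, if_false, hf]
  cases forA laberinto punto_final fuel (pyGetAdj laberinto v)
      (PySem.Set.add vis v) (cam ++ [v]) with
  | none => rfl
  | some t =>
    obtain ⟨b, a, c⟩ := t
    cases b <;> rfl

-- THE SIMULATION: each outcome of A's neighbor loop is reproduced by B's machine,
-- with a step count k small enough to fit under B's fuel.
theorem forA_sim (laberinto : List (String × List String)) (punto_final : String) :
    ∀ (fuel : Nat) (l : List String) (vis : PySem.Set String) (cam : List String)
      (rest : List (List String)), (∀ v ∈ l, v ∈ allN laberinto) →
      (∀ vis1 cam1, forA laberinto punto_final fuel l vis cam = some (true, vis1, cam1) →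
        ∃ k, k ≤ 2 * pvFree laberinto vis + 2 ∧
          loopB laberinto punto_final k (l :: rest) vis cam = some (some cam1)) ∧
      (∀ vis1 cam1, forA laberinto punto_final fuel l vis cam = some (false, vis1, cam1) →
        ∃ k, k + 2 * pvFree laberinto vis1 ≤ 2 * pvFree laberinto vis + 1 ∧
          ∀ j, loopB laberinto punto_final (k + j) (l :: rest) vis cam =
            loopB laberinto punto_final j rest vis1 cam1.dropLast) := by
  intro fuel
  induction fuel with
  | zero =>
    intro l vis cam rest hsub
    cases l with
    | nil =>
      constructor
      · intro vis1 cam1 h; rw [forA_nil] at h; simp at h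
      · intro vis1 cam1 h
        rw [forA_nil] at h
        obtain ⟨hvis, hcam⟩ : vis = vis1 ∧ cam = cam1 := by
          injection h with h'; injection h' with _ h''; cases h''; exact ⟨rfl, rfl⟩
        subst hvis; subst hcam
        refine ⟨1, by omega, ?_⟩
        intro j
        have e : 1 + j = j + 1 := by omega
        rw [e, loopB_pop _ _ _ _ _ _ _ rfl]
    | cons v l' =>
      constructor <;> · intro vis1 cam1 h; rw [forA, dfsA] at h; simp at h
  | succ fuel ih =>
    intro l
    induction l with
    | nil =>
      intro vis cam rest hsub
      constructor
      · intro vis1 cam1 h; rw [forA_nil] at h; simp at h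
      · intro vis1 cam1 h
        rw [forA_nil] at h
        obtain ⟨hvis, hcam⟩ : vis = vis1 ∧ cam = cam1 := by
          injection h with h'; injection h' with _ h''; cases h''; exact ⟨rfl, rfl⟩
        subst hvis; subst hcam
        refine ⟨1, by omega, ?_⟩
        intro j
        have e : 1 + j = j + 1 := by omega
        rw [e, loopB_pop _ _ _ _ _ _ _ rfl]
    | cons v l' ihl =>
      intro vis cam rest hsub
      have hvN : v ∈ allN laberinto := hsub v (by simp)
      have hsub' : ∀ x ∈ l', x ∈ allN laberinto := fun x hx => hsub x (by simp [hx])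
      cases hv : PySem.Set.contains vis v with
      | true =>
        -- visited head: A's dfs returns False at once, B's machine skips it in-step
        obtain ⟨ihT, ihF⟩ := ihl vis cam rest hsub'
        constructor
        · intro vis1 cam1 h
          rw [forA_cons_mem _ _ _ _ _ _ _ hv] at h
          obtain ⟨k, hk, hrun⟩ := ihT vis1 cam1 h
          exact ⟨k, hk, by rw [loopB_skip _ _ _ _ _ _ _ hv]; exact hrun⟩
        · intro vis1 cam1 h
          rw [forA_cons_mem _ _ _ _ _ _ _ hv] at h
          obtain ⟨k, hk, hreach⟩ := ihF vis1 cam1 h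
          exact ⟨k, hk, fun j => by rw [loopB_skip _ _ _ _ _ _ _ hv]; exact hreach j⟩
      | false =>
        have hfree : pvFree laberinto (PySem.Set.add vis v) < pvFree laberinto vis :=
          pvFree_add_lt laberinto vis v hvN hv
        by_cases hf : v = punto_final
        · -- unvisited final head: both return the extended camino immediately
          constructor
          · intro vis1 cam1 h
            rw [forA_cons_final _ _ _ _ _ _ _ hv hf] at h
            obtain ⟨hvis, hcam⟩ : PySem.Set.add vis v = vis1 ∧ cam ++ [v] = cam1 := by
              injection h with h'; injection h' with _ h''; cases h''; exact ⟨rfl, rfl⟩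
            subst hvis; subst hcam
            refine ⟨1, by omega, ?_⟩
            rw [loopB_found _ _ 0 _ _ _ _ _ _ (nextUnvis_cons_new vis v l' hv) hf]
          · intro vis1 cam1 h
            rw [forA_cons_final _ _ _ _ _ _ _ hv hf] at h
            simp at h
        · -- unvisited non-final head: one machine step enters v, then the IHs take over
          have hstep := forA_step laberinto punto_final fuel v l' vis cam hv hf
          obtain ⟨ihT', ihF'⟩ := ih (pyGetAdj laberinto v) (PySem.Set.add vis v)
            (cam ++ [v]) (l' :: rest) (fun x hx => pyGetAdj_sub laberinto v x hx)
          cases hInner : forA laberinto punto_final fuel (pyGetAdj laberinto v)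
              (PySem.Set.add vis v) (cam ++ [v]) with
          | none =>
            rw [hInner] at hstep
            constructor <;> · intro vis1 cam1 h; rw [hstep] at h; simp at h
          | some t =>
            obtain ⟨b, a, c⟩ := t
            cases b with
            | true =>
              rw [hInner] at hstep
              obtain ⟨k1, hk1, hrun⟩ := ihT' a c hInner
              constructor
              · intro vis1 cam1 h
                rw [hstep] at h
                obtain ⟨hvis, hcam⟩ : a = vis1 ∧ c = cam1 := by
                  injection h with h'; injection h' with _ h''; cases h''; exact ⟨rfl, rfl⟩
                subst hvis; subst hcam
                refine ⟨k1 + 1, by omega, ?_⟩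
                rw [loopB_push _ _ _ _ _ _ _ _ _ (nextUnvis_cons_new vis v l' hv) hf]
                exact hrun
              · intro vis1 cam1 h
                rw [hstep] at h
                simp at h
            | false =>
              rw [hInner] at hstep
              obtain ⟨k1, hk1, hreach⟩ := ihF' a c hInner
              obtain ⟨ihlT, ihlF⟩ := ihl a c.dropLast rest hsub'
              constructor
              · intro vis1 cam1 h
                rw [hstep] at h
                obtain ⟨k2, hk2, hrun2⟩ := ihlT vis1 cam1 h
                refine ⟨1 + k1 + k2, by omega, ?_⟩
                have e : 1 + k1 + k2 = (k1 + k2) + 1 := by omega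
                rw [e, loopB_push _ _ _ _ _ _ _ _ _ (nextUnvis_cons_new vis v l' hv) hf,
                  hreach k2]
                exact hrun2
              · intro vis1 cam1 h
                rw [hstep] at h
                obtain ⟨k2, hk2, hreach2⟩ := ihlF vis1 cam1 h
                refine ⟨1 + k1 + k2, by omega, ?_⟩
                intro j
                have e : 1 + k1 + k2 + j = (k1 + (k2 + j)) + 1 := by omega
                rw [e, loopB_push _ _ _ _ _ _ _ _ _ (nextUnvis_cons_new vis v l' hv) hf,
                  hreach (k2 + j)]
                exact hreach2 j

-- A's fuel is sufficient: the neighbor loop always returns `some`, and visiting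
-- only shrinks the pool of unvisited candidates.
theorem forA_suff (laberinto : List (String × List String)) (punto_final : String) :
    ∀ (fuel : Nat) (l : List String) (vis : PySem.Set String) (cam : List String),
      (∀ v ∈ l, v ∈ allN laberinto) → pvFree laberinto vis + 1 ≤ fuel →
      ∃ b vis1 cam1, forA laberinto punto_final fuel l vis cam = some (b, vis1, cam1) ∧
        pvFree laberinto vis1 ≤ pvFree laberinto vis := by
  intro fuel
  induction fuel with
  | zero => intro l vis cam _ hfuel; omega
  | succ fuel ih =>
    intro l
    induction l with
    | nil => intro vis cam _ _; exact ⟨false, vis, cam, forA_nil _ _ _ _ _, le_refl _⟩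
    | cons v l' ihl =>
      intro vis cam hsub hfuel
      have hvN : v ∈ allN laberinto := hsub v (by simp)
      have hsub' : ∀ x ∈ l', x ∈ allN laberinto := fun x hx => hsub x (by simp [hx])
      cases hv : PySem.Set.contains vis v with
      | true =>
        rw [forA_cons_mem _ _ _ _ _ _ _ hv]
        exact ihl vis cam hsub' hfuel
      | false =>
        have hfree : pvFree laberinto (PySem.Set.add vis v) < pvFree laberinto vis :=
          pvFree_add_lt laberinto vis v hvN hv
        by_cases hf : v = punto_final
        · rw [forA_cons_final _ _ _ _ _ _ _ hv hf]
          exact ⟨true, PySem.Set.add vis v, cam ++ [v], rfl, by omega⟩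
        · rw [forA_step laberinto punto_final fuel v l' vis cam hv hf]
          obtain ⟨b1, a, c, hInner, hle1⟩ := ih (pyGetAdj laberinto v)
            (PySem.Set.add vis v) (cam ++ [v])
            (fun x hx => pyGetAdj_sub laberinto v x hx) (by omega)
          rw [hInner]
          cases b1 with
          | true => exact ⟨true, a, c, rfl, by omega⟩
          | false =>
            obtain ⟨b2, vis2, cam2, h2, hle2⟩ := ihl a c.dropLast hsub' (by omega)
            exact ⟨b2, vis2, cam2, h2, by omega⟩

theorem allN_length (laberinto : List (String × List String)) :
    (allN laberinto).length = (laberinto.map (fun p => p.2.length)).sum := by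
  unfold allN
  rw [List.length_flatten, List.map_map]
  rfl

-- ===== VERDICT (by name: the statement is the Claim_ definition above) =====
theorem encontrar_camino_spec : Claim_equal_encontrar_camino := by
  intro laberinto punto_inicio punto_final _
  unfold Spec_encontrar_camino encontrar_camino encontrar_camino_alt
  have hempty : PySem.Set.contains PySem.Set.empty punto_inicio = false := rfl
  have hfuel : 3 + (laberinto.map (fun p => p.2.length)).sum =
      (2 + (laberinto.map (fun p => p.2.length)).sum) + 1 := by omega
  rw [hfuel, dfsA]
  simp only [hempty, Bool.false_eq_true, if_false, List.nil_append]
  by_cases hf : punto_inicio = punto_final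
  · simp [hf]
  · simp only [hf, if_false]
    set vis0 : PySem.Set String := PySem.Set.add PySem.Set.empty punto_inicio with hvis0
    set s : Nat := (laberinto.map (fun p => p.2.length)).sum with hs
    have hfree0 : pvFree laberinto vis0 ≤ s := by
      rw [hs, ← allN_length]
      exact List.length_filter_le _ _
    obtain ⟨b, vis1, cam1, hA, _⟩ := forA_suff laberinto punto_final (2 + s)
      (pyGetAdj laberinto punto_inicio) vis0 [punto_inicio]
      (fun x hx => pyGetAdj_sub laberinto punto_inicio x hx) (by omega)
    obtain ⟨simT, simF⟩ := forA_sim laberinto punto_final (2 + s)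
      (pyGetAdj laberinto punto_inicio) vis0 [punto_inicio] []
      (fun x hx => pyGetAdj_sub laberinto punto_inicio x hx)
    rw [hA]
    cases b with
    | true =>
      obtain ⟨k, hk, hrun⟩ := simT vis1 cam1 hA
      have hB : loopB laberinto punto_final (2 * s + 4) [pyGetAdj laberinto punto_inicio]
          vis0 [punto_inicio] = some (some cam1) := by
        have e : 2 * s + 4 = k + (2 * s + 4 - k) := by omega
        rw [e]
        exact loopB_mono _ _ _ _ _ _ _ _ hrun
      rw [hB]
    | false =>
      obtain ⟨k, hk, hreach⟩ := simF vis1 cam1 hA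
      have h1 : loopB laberinto punto_final (k + 1) [pyGetAdj laberinto punto_inicio]
          vis0 [punto_inicio] = some none := by
        rw [hreach 1]
        rfl
      have hB : loopB laberinto punto_final (2 * s + 4) [pyGetAdj laberinto punto_inicio]
          vis0 [punto_inicio] = some none := by
        have e : 2 * s + 4 = (k + 1) + (2 * s + 4 - (k + 1)) := by omega
        rw [e]
        exact loopB_mono _ _ _ _ _ _ _ _ h1
      rw [hB]
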